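-- pv_equiv track=rewrite | github.com/cchauvin-raja/visu | scrabble2.py | combinaison_lettres
-- ===== SOURCE A (Python) =====
-- def combinaison_lettres(tirage, longueur):
--     # permet de faire toutes les combinaisaons de k lettre à partir d'un tableau
--     # à transformer avec chaines
--     p = []
--     i, imax = 0, 2**len(tirage)-1
--     while i<=imax:
--         s = []
--         j, jmax = 0, len(tirage)-1
--         while j<=jmax:
--             if (i>>j)&1==1:
--                 s.append(tirage[j])
--             j += 1
--         if len(s)==longueur:
--             p.append(''.join(sorted(s)))
--         i += 1
--     return p
-- ===== SOURCE B (Python) =====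
-- def combinaison_lettres(tirage, longueur):
--     # Enumerate only the size-k subsets directly, in colex order of index sets
--     # (= increasing-mask order, matching A), instead of scanning all 2^n masks.
--     if longueur < 0:
--         return []
--     def colex(m, k):
--         # k-subsets of indices 0..m-1 in colex order, each as the list of letters
--         if k == 0:
--             return [[]]
--         res = []
--         for last in range(k - 1, m):
--             for sub in colex(last, k - 1):
--                 res.append(sub + [tirage[last]])
--         return res
--     return [''.join(sorted(sub)) for sub in colex(len(tirage), longueur)]
-- ===== Notes on version B (the rewrite author's own statement) =====
-- stated objective: faster
-- what changed: B enumerates only the C(n,k) size-k index subsets directly by a colex-order recursion instead of scanning all 2^n bitmasks and filtering by popcount.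
import Mathlib
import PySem

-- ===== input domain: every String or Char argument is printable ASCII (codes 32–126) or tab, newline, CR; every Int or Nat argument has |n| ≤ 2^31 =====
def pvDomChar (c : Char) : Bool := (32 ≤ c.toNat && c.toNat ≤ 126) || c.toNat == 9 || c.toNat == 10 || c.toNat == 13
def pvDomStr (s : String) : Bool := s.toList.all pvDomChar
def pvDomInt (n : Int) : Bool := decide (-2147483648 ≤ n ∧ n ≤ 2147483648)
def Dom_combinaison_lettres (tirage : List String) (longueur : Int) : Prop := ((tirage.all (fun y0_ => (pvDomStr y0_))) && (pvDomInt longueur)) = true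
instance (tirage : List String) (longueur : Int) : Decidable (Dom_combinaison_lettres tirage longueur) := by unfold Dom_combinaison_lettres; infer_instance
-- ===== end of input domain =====

-- B replaces A's scan of all 2^n bitmasks by a direct colex-order enumeration of
-- only the size-k index subsets (objective: faster).

-- shared port helper: ''.join(sorted(s))
def strOf (s : List String) : String := PySem.Str.join "" (PySem.List.sorted s (fun x => x) false)

-- ===== PORT A =====
-- the while loops over i = 0..2^n-1 and j = 0..n-1 become folds over List.range
-- (both counters stay nonnegative in Python, so Nat ranges are exact);
-- tirage[j] is always in range (0 ≤ j < len(tirage)), so List.getD is exact here.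
def combinaison_lettres (tirage : List String) (longueur : Int) : List String :=
  (List.range (2 ^ tirage.length)).foldl (fun p i =>
    let s := (List.range tirage.length).foldl (fun s j =>
      if (i >>> j) &&& 1 == 1 then s ++ [tirage.getD j ""] else s) ([] : List String)
    if (s.length : Int) == longueur then p ++ [strOf s] else p) []

-- ===== PORT B =====
-- colex(m, k) of Source B: the nested append loops become a fold over range(k-1, m)
-- (= List.range' (k-1) (m-(k-1)), written with the k-1 matched away so the
-- recursion is structural in k); tirage[last] is in range, so List.getD is exact.
def colexAux (tirage : List String) : Nat → Nat → List (List String)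
  | _, 0 => [[]]
  | m, k+1 => (List.range' k (m - k)).foldl
      (fun res last => res ++ (colexAux tirage last k).map (fun sub => sub ++ [tirage.getD last ""])) []

def combinaison_lettres_alt (tirage : List String) (longueur : Int) : List String :=
  if longueur < 0 then []
  else (colexAux tirage tirage.length longueur.toNat).map strOf

-- ===== PRECONDITION & SPEC =====
def Spec_combinaison_lettres (tirage : List String) (longueur : Int) (out : List String) : Prop := out = combinaison_lettres_alt tirage longueur
instance (tirage : List String) (longueur : Int) (out : List String) : Decidable (Spec_combinaison_lettres tirage longueur out) := by unfold Spec_combinaison_lettres; infer_instance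

-- ===== CLAIM (what is proved, stated in full; the proofs are below) =====
def Claim_equal_combinaison_lettres : Prop := ∀ (tirage : List String) (longueur : Int), Dom_combinaison_lettres tirage longueur → Spec_combinaison_lettres tirage longueur (combinaison_lettres tirage longueur)

-- ===== LEMMAS AND PROOFS =====

-- the subset of letters selected by bitmask i (A's inner loop)
def subsOf (ts : List String) (i : Nat) : List String :=
  (List.range ts.length).foldl (fun s j => if (i >>> j) &&& 1 == 1 then s ++ [ts.getD j ""] else s) []

theorem bit_eq (i j : Nat) : ((i >>> j) &&& 1 == 1) = i.testBit j := by
  simp [Nat.testBit, Nat.and_one_is_mod, Nat.one_and_eq_mod_two]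

-- A is: over all masks, keep the subsets of the requested length, mapped through join∘sorted
theorem A_as_filter (ts : List String) (L : Int) :
    combinaison_lettres ts L
      = (((List.range (2 ^ ts.length)).map (subsOf ts)).filter
          (fun s => (s.length : Int) == L)).map strOf := by
  unfold combinaison_lettres
  rw [show (fun (p : List String) (i : Nat) =>
        let s := (List.range ts.length).foldl (fun s j =>
          if (i >>> j) &&& 1 == 1 then s ++ [ts.getD j ""] else s) ([] : List String)
        if (s.length : Int) == L then p ++ [strOf s] else p)
      = fun p i => if ((subsOf ts i).length : Int) == L then p ++ [strOf (subsOf ts i)] else p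
      from rfl]
  rw [← List.foldl_map (f := subsOf ts)
        (g := fun (p : List String) s => if (s.length : Int) == L then p ++ [strOf s] else p)
        (l := List.range (2 ^ ts.length)) (init := ([] : List String))]
  rw [PySem.List.foldl_append_if]
  rfl

theorem subsOf_lo (ts : List String) (x : String) (i : Nat) (h : i < 2 ^ ts.length) :
    subsOf (ts ++ [x]) i = subsOf ts i := by
  unfold subsOf
  rw [List.length_append, List.length_singleton, List.range_succ, List.foldl_append]
  simp only [List.foldl]
  rw [bit_eq, Nat.testBit_lt_two_pow h]
  simp only [if_neg (by simp : ¬ (false = true))]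
  apply PySem.List.foldl_congr_mem
  intro acc j hj
  rw [List.getD_append _ _ _ _ (List.mem_range.mp hj)]

theorem subsOf_hi (ts : List String) (x : String) (i : Nat) (h : i < 2 ^ ts.length) :
    subsOf (ts ++ [x]) (2 ^ ts.length + i) = subsOf ts i ++ [x] := by
  unfold subsOf
  rw [List.length_append, List.length_singleton, List.range_succ, List.foldl_append]
  simp only [List.foldl]
  rw [bit_eq, Nat.testBit_two_pow_add_eq, Nat.testBit_lt_two_pow h]
  simp only [Bool.not_false]
  rw [List.getD_append_right _ _ _ _ (le_refl _), Nat.sub_self]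
  have hpre : (List.range ts.length).foldl
      (fun s j => if ((2 ^ ts.length + i) >>> j &&& 1 == 1) = true then s ++ [(ts ++ [x]).getD j ""] else s) []
      = (List.range ts.length).foldl
      (fun s j => if (i >>> j &&& 1 == 1) = true then s ++ [ts.getD j ""] else s) [] := by
    apply PySem.List.foldl_congr_mem
    intro acc j hj
    have hj' := List.mem_range.mp hj
    rw [bit_eq, bit_eq, Nat.testBit_two_pow_add_gt hj', List.getD_append _ _ _ _ hj']
  rw [hpre]
  rfl

-- the masks 0..2^(n+1)-1 of ts ++ [x]: first the subsets without x, then the same subsets with x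
theorem masks_snoc (ts : List String) (x : String) :
    (List.range (2 ^ (ts ++ [x]).length)).map (subsOf (ts ++ [x]))
      = ((List.range (2 ^ ts.length)).map (subsOf ts))
        ++ (((List.range (2 ^ ts.length)).map (subsOf ts)).map (· ++ [x])) := by
  rw [List.length_append, List.length_singleton, pow_succ, Nat.mul_two, List.range_add]
  rw [List.map_append, List.map_map, List.map_map]
  congr 1
  · apply List.map_congr_left
    intro i hi
    exact subsOf_lo ts x i (List.mem_range.mp hi)
  · apply List.map_congr_left
    intro i hi
    exact subsOf_hi ts x i (List.mem_range.mp hi)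

theorem colex_nil (ts : List String) (k m : Nat) (h : m < k) : colexAux ts m k = [] := by
  match k with
  | 0 => omega
  | k+1 =>
    unfold colexAux
    rw [Nat.sub_eq_zero_of_le (by omega)]
    rfl

theorem colex_rec (ts : List String) (m k : Nat) :
    colexAux ts (m + 1) (k + 1)
      = colexAux ts m (k + 1) ++ (colexAux ts m k).map (· ++ [ts.getD m ""]) := by
  by_cases hk : k ≤ m
  · show (List.range' k (m + 1 - k)).foldl _ [] = _
    have : m + 1 - k = (m - k) + 1 := by omega
    rw [this, List.range'_concat]
    rw [List.foldl_append]
    have hm : k + 1 * (m - k) = m := by omega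
    rw [hm]
    simp only [List.foldl]
    congr 1
  · rw [colex_nil ts (k+1) (m+1) (by omega), colex_nil ts (k+1) m (by omega),
        colex_nil ts k m (by omega)]
    rfl

theorem filter_len_map_append_zero (c : String) (S : List (List String)) :
    List.filter (fun s => s.length == 0) (S.map (· ++ [c])) = [] := by
  apply List.filter_eq_nil_iff.mpr
  intro s hs
  obtain ⟨t, _, rfl⟩ := List.mem_map.mp hs
  simp

theorem filter_len_map_append_succ (c : String) (S : List (List String)) (k : Nat) :
    List.filter (fun s => s.length == k + 1) (S.map (· ++ [c]))
      = (S.filter (fun s => s.length == k)).map (· ++ [c]) := by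
  rw [List.filter_map]
  congr 1
  apply List.filter_congr
  intro s _
  simp

-- the size-k subsets among the masks of the first m letters, in mask order, ARE colex(m, k)
theorem main_lemma (ts : List String) :
    ∀ m, m ≤ ts.length → ∀ k,
      ((List.range (2 ^ m)).map (subsOf (ts.take m))).filter (fun s => s.length == k)
        = colexAux ts m k := by
  intro m
  induction m with
  | zero =>
    intro _ k
    cases k with
    | zero => rfl
    | succ k =>
      show List.filter _ _ = colexAux ts 0 (k+1)
      rw [colex_nil ts (k+1) 0 (by omega)]
      rfl
  | succ m ih =>
    intro hm k
    have hm' : m ≤ ts.length := by omega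
    have hmlt : m < ts.length := by omega
    have hlen : (ts.take m).length = m := by simp [List.length_take]; omega
    have hx : ts.take (m+1) = ts.take m ++ [ts.getD m ""] := by
      rw [List.take_add_one, List.getElem?_eq_getElem hmlt]
      congr 1
      simp [List.getD_eq_getElem?_getD, List.getElem?_eq_getElem hmlt]
    have hsnoc := masks_snoc (ts.take m) (ts.getD m "")
    rw [List.length_append, List.length_singleton, hlen] at hsnoc
    rw [hx, hsnoc, List.filter_append]
    cases k with
    | zero =>
      rw [filter_len_map_append_zero, List.append_nil, ih hm' 0]
      rfl
    | succ k =>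
      rw [filter_len_map_append_succ, ih hm' (k+1), ih hm' k, ← colex_rec]

theorem final (ts : List String) (L : Int) :
    combinaison_lettres ts L = combinaison_lettres_alt ts L := by
  unfold combinaison_lettres_alt
  rw [A_as_filter]
  by_cases hL : L < 0
  · rw [if_pos hL]
    rw [List.filter_eq_nil_iff.mpr (by intro s _; simp; omega)]
    rfl
  · rw [if_neg hL]
    have hfc : List.filter (fun s => ((s.length : Int) == L))
        ((List.range (2 ^ ts.length)).map (subsOf ts))
        = List.filter (fun s => s.length == L.toNat)
        ((List.range (2 ^ ts.length)).map (subsOf ts)) := by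
      apply List.filter_congr
      intro s _
      rw [Bool.eq_iff_iff, beq_iff_eq, beq_iff_eq]
      omega
    rw [hfc]
    have := main_lemma ts ts.length (le_refl _) L.toNat
    rw [List.take_length] at this
    rw [this]

-- ===== VERDICT (by name: the statement is the Claim_ definition above) =====
theorem combinaison_lettres_spec : Claim_equal_combinaison_lettres := by
  intro ts L _
  unfold Spec_combinaison_lettres
  exact final ts L
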